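-- pv_equiv track=rewrite | github.com/Reaper-ai/AdventOfCode2024 | day4/day4.py | search_diagonally
-- ===== SOURCE A (Python) =====
-- def search_diagonally(grid, sub):
--     rows = len(grid)
--     cols = len(grid[0])
--     sub_len = len(sub)
--     count = 0
--
--     for i in range(rows):
--         for j in range(cols):
--             # main diag
--             if i + sub_len <= rows and j + sub_len <= cols:
--                 if all(grid[i + k][j + k] == sub[k] for k in range(sub_len)):
--                     count += 1
--             # sec diag
--             if i - sub_len >= -1 and j + sub_len <= cols:
--                 if all(grid[i - k][j + k] == sub[k] for k in range(sub_len)):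
--                     count += 1
--     return count
-- ===== SOURCE B (Python) =====
-- def search_diagonally(grid, sub):
--     rows = len(grid)
--     cols = len(grid[0])
--     m = len(sub)
--     count = 0
--     diags = []
--     # down-right diagonals, starting on the top row then on the left column
--     for j in range(cols):
--         diags.append(''.join(grid[t][j + t] for t in range(min(rows, cols - j))))
--     for i in range(1, rows):
--         diags.append(''.join(grid[i + t][t] for t in range(min(rows - i, cols))))
--     # up-right (anti) diagonals, read bottom-left to top-right
--     for c in range(rows + cols - 1):
--         i0 = min(c, rows - 1)
--         j0 = c - i0
--         diags.append(''.join(grid[i0 - t][j0 + t] for t in range(min(i0 + 1, cols - j0))))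
--     # count overlapping occurrences of sub in every diagonal string
--     for d in diags:
--         for p in range(len(d)):
--             if d[p:p + m] == sub:
--                 count += 1
--     return count
-- ===== Notes on version B (the rewrite author's own statement) =====
-- stated objective: alternative
-- what changed: Instead of re-testing the pattern cell by cell with a generator at every grid position, B extracts every down-right diagonal and every up-right anti-diagonal once as strings and counts overlapping occurrences of sub in each by slice comparison.
-- outside the precondition, e.g. on search_diagonally(['ab', 'c'], 'bz'): A returns 0, B raises IndexError
import Mathlib
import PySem

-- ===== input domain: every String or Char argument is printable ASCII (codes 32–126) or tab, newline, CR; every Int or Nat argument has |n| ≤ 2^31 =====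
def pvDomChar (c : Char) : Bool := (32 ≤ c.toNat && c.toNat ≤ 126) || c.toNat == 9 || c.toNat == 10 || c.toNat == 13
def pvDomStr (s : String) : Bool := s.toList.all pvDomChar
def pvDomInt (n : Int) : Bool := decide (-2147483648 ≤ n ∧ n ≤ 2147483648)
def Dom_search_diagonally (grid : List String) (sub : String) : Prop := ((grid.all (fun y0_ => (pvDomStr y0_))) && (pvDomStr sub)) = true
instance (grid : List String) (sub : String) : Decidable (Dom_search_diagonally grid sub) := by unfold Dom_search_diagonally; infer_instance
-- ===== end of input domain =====

-- B replaces A's per-cell re-checking of the pattern with extracting every diagonal once and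
-- scanning each diagonal string for overlapping occurrences (objective: alternative decomposition).

-- cell access grid[i][j]; under Pre_ every index used by either port is in range, so the
-- defaults are never reached there
def pvCell (g : List (List Char)) (i j : Nat) : Char := (g.getD i []).getD j ' '

-- ===== PORT A =====
-- literal transliteration of A: for each cell (i,j), test the pattern down-right and up-right.
-- range(rows)/range(cols)/range(sub_len) are List.range (bounds are non-negative lengths);
-- 'i - sub_len >= -1' over Python ints is 'sub_len ≤ i + 1' since i, sub_len ≥ 0, and then
-- every 'i - k' (k < sub_len ≤ i+1) is non-negative, so Nat subtraction is exact.
def search_diagonally (grid : List String) (sub : String) : Int :=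
  let g := grid.map String.toList
  let rows := g.length
  let cols := (g.getD 0 []).length   -- len(grid[0]); grid = [] raises in Python, excluded by Pre_
  let s := sub.toList
  let m := s.length
  (List.range rows).foldl (fun count i =>
    (List.range cols).foldl (fun count j =>
      let count :=
        if i + m ≤ rows ∧ j + m ≤ cols ∧
            ((List.range m).all (fun k => pvCell g (i + k) (j + k) == s.getD k ' ')) = true
        then count + 1 else count
      if m ≤ i + 1 ∧ j + m ≤ cols ∧
          ((List.range m).all (fun k => pvCell g (i - k) (j + k) == s.getD k ' ')) = true
      then count + 1 else count) count) 0

-- ===== PORT B =====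
-- literal transliteration of B (Source B): build every down-right diagonal (starts on the top row,
-- then on the left column: range(1, rows) = [1..rows-1]) and every up-right anti-diagonal,
-- then count overlapping occurrences of sub in each diagonal; d[p:p+m] == sub is
-- (d.drop p).take m = s (ASCII strings as char lists).
def search_diagonally_alt (grid : List String) (sub : String) : Int :=
  let g := grid.map String.toList
  let rows := g.length
  let cols := (g.getD 0 []).length
  let s := sub.toList
  let m := s.length
  let mains1 := (List.range cols).map (fun j =>
      (List.range (min rows (cols - j))).map (fun t => pvCell g t (j + t)))
  let mains2 := (List.range (rows - 1)).map (fun i =>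
      (List.range (min (rows - (i + 1)) cols)).map (fun t => pvCell g (i + 1 + t) t))
  let antis := (List.range (rows + cols - 1)).map (fun c =>
      let i0 := min c (rows - 1)
      let j0 := c - i0
      (List.range (min (i0 + 1) (cols - j0))).map (fun t => pvCell g (i0 - t) (j0 + t)))
  let diags := mains1 ++ mains2 ++ antis
  diags.foldl (fun count d =>
    (List.range d.length).foldl (fun count p =>
      if (d.drop p).take m = s then count + 1 else count) count) 0

-- ===== PRECONDITION & SPEC =====
-- Pre_ excludes the empty grid (grid[0] raises IndexError in both A and B) and ragged grids in
-- which some row is shorter than the first row: there an out-of-range cell access raises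
-- IndexError in B always and in A unless a mismatch short-circuits first.
def Pre_search_diagonally (grid : List String) (sub : String) : Prop :=
  grid ≠ [] ∧ ∀ r ∈ grid, (grid.headD "").toList.length ≤ r.toList.length
instance (grid : List String) (sub : String) : Decidable (Pre_search_diagonally grid sub) := by
  unfold Pre_search_diagonally; infer_instance
def pvWitness_search_diagonally : List String × String := (["ab", "cd"], "a")
def Spec_search_diagonally (grid : List String) (sub : String) (out : Int) : Prop :=
  out = search_diagonally_alt grid sub
instance (grid : List String) (sub : String) (out : Int) : Decidable (Spec_search_diagonally grid sub out) := by
  unfold Spec_search_diagonally; infer_instance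

-- ===== CLAIM (what is proved, stated in full; the proofs are below) =====
def Claim_equal_search_diagonally : Prop := ∀ (grid : List String) (sub : String),
  Dom_search_diagonally grid sub → Pre_search_diagonally grid sub →
  Spec_search_diagonally grid sub (search_diagonally grid sub)

-- ===== LEMMAS AND PROOFS =====

-- the two per-cell indicators of A (exact condition shapes of the port)
def pvIndM (g : List (List Char)) (s : List Char) (R C i j : ℕ) : ℤ :=
  if i + s.length ≤ R ∧ j + s.length ≤ C ∧
      ((List.range s.length).all (fun k => pvCell g (i + k) (j + k) == s.getD k ' ')) = true
  then 1 else 0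

def pvIndS (g : List (List Char)) (s : List Char) (C i j : ℕ) : ℤ :=
  if s.length ≤ i + 1 ∧ j + s.length ≤ C ∧
      ((List.range s.length).all (fun k => pvCell g (i - k) (j + k) == s.getD k ' ')) = true
  then 1 else 0

lemma pv_foldl_range_add (n : ℕ) (f : ℕ → ℤ) (a : ℤ) :
    (List.range n).foldl (fun c x => c + f x) a = a + ∑ x ∈ Finset.range n, f x := by
  induction n with
  | zero => simp
  | succ n ih => simp [List.range_succ, ih, Finset.sum_range_succ]; ring

lemma pv_sum_map_range (n : ℕ) (h : ℕ → ℤ) :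
    ((List.range n).map h).sum = ∑ x ∈ Finset.range n, h x := by
  induction n with
  | zero => simp
  | succ n ih => simp [List.range_succ, ih, Finset.sum_range_succ]

lemma pv_slice_eq (L t : ℕ) (ht : t < L) (F : ℕ → Char) (s : List Char) :
    ((((List.range L).map F).drop t).take s.length = s)
      ↔ (t + s.length ≤ L ∧ ∀ k < s.length, F (t + k) = s.getD k ' ') := by
  constructor
  · intro h
    have hlen : ((((List.range L).map F).drop t).take s.length).length = s.length := by rw [h]
    simp only [List.length_take, List.length_drop, List.length_map, List.length_range] at hlen
    refine ⟨by omega, fun k hk => ?_⟩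
    have hsk : k < ((((List.range L).map F).drop t).take s.length).length := by
      simp only [List.length_take, List.length_drop, List.length_map, List.length_range]; omega
    have h3 : ((((List.range L).map F).drop t).take s.length)[k]'hsk = s[k]'hk :=
      List.getElem_of_eq h hsk
    simp only [List.getElem_take, List.getElem_drop, List.getElem_map, List.getElem_range] at h3
    rw [List.getD_eq_getElem s ' ' hk, ← h3]
  · rintro ⟨h1, h2⟩
    apply List.ext_getElem
    · simp only [List.length_take, List.length_drop, List.length_map, List.length_range]; omega
    · intro k hk1 hk2
      simp only [List.getElem_take, List.getElem_drop, List.getElem_map, List.getElem_range]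
      have := h2 k hk2
      rwa [List.getD_eq_getElem s ' ' hk2] at this

def pvScanSum (s : List Char) (d : List Char) : ℤ :=
  ∑ p ∈ Finset.range d.length, (if (d.drop p).take s.length = s then (1:ℤ) else 0)

lemma pv_scan_sum_eq (L : ℕ) (F : ℕ → Char) (s : List Char) :
    pvScanSum s ((List.range L).map F)
    = ∑ t ∈ Finset.range L,
        (if (t + s.length ≤ L ∧ ∀ k < s.length, F (t + k) = s.getD k ' ') then (1:ℤ) else 0) := by
  unfold pvScanSum
  simp only [List.length_map, List.length_range]
  exact Finset.sum_congr rfl fun t ht => if_congr (pv_slice_eq L t (Finset.mem_range.mp ht) F s) rfl rfl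

lemma pv_foldl_add' {α : Type} (l : List α) (f : α → ℤ) (a : ℤ) :
    l.foldl (fun c x => c + f x) a = a + (l.map f).sum := by
  induction l generalizing a with
  | nil => simp
  | cons x xs ih => simp only [List.foldl_cons, List.map_cons, List.sum_cons, ih]; ring

lemma pv_sum_range_extend (L R : ℕ) (h : L ≤ R) (f : ℕ → ℤ) :
    ∑ t ∈ Finset.range L, f t = ∑ t ∈ Finset.range R, (if t < L then f t else 0) := by
  induction R with
  | zero => have : L = 0 := by omega
            simp [this]
  | succ n ih =>
    rcases Nat.lt_or_ge L (n + 1) with hlt | hge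
    · rw [Finset.sum_range_succ, if_neg (by omega), ih (by omega), add_zero]
    · have hL : L = n + 1 := by omega
      subst hL
      refine Finset.sum_congr rfl (fun t htm => ?_)
      rw [if_pos (Finset.mem_range.mp htm)]

lemma pv_main_reindex (R C : ℕ) (f : ℕ → ℕ → ℤ) :
    ((∑ j ∈ Finset.range C, ∑ t ∈ Finset.range (min R (C - j)), f t (j + t))
     + ∑ i ∈ Finset.range (R - 1), ∑ t ∈ Finset.range (min (R - (i + 1)) C), f (i + 1 + t) t)
    = ∑ i ∈ Finset.range R, ∑ j ∈ Finset.range C, f i j := by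
  rw [← Finset.sum_product']
  rw [← Finset.sum_filter_add_sum_filter_not (Finset.range R ×ˢ Finset.range C)
      (fun p => p.1 ≤ p.2) (fun p => f p.1 p.2)]
  congr 1
  · have h1 : (∑ j ∈ Finset.range C, ∑ t ∈ Finset.range (min R (C - j)), f t (j + t))
        = ∑ x ∈ (Finset.range C ×ˢ Finset.range R).filter (fun x => x.2 < min R (C - x.1)),
            f x.2 (x.1 + x.2) := by
      rw [Finset.sum_filter, Finset.sum_product]
      exact Finset.sum_congr rfl (fun j _ => pv_sum_range_extend _ _ (Nat.min_le_left _ _) _)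
    rw [h1]
    refine Finset.sum_nbij' (fun x => (x.2, x.1 + x.2)) (fun p => (p.2 - p.1, p.1)) ?_ ?_ ?_ ?_ ?_
    · rintro ⟨a, b⟩ hx
      simp only [Finset.mem_filter, Finset.mem_product, Finset.mem_range] at hx ⊢; omega
    · rintro ⟨a, b⟩ hp
      simp only [Finset.mem_filter, Finset.mem_product, Finset.mem_range] at hp ⊢; omega
    · rintro ⟨a, b⟩ hx
      simp only [Finset.mem_filter, Finset.mem_product, Finset.mem_range] at hx
      simp only [Prod.mk.injEq, and_true, true_and]; omega
    · rintro ⟨a, b⟩ hp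
      simp only [Finset.mem_filter, Finset.mem_product, Finset.mem_range] at hp
      simp only [Prod.mk.injEq, and_true, true_and]; omega
    · rintro ⟨a, b⟩ hx; rfl
  · have h2 : (∑ i ∈ Finset.range (R - 1), ∑ t ∈ Finset.range (min (R - (i + 1)) C), f (i + 1 + t) t)
        = ∑ x ∈ (Finset.range (R - 1) ×ˢ Finset.range R).filter
              (fun x => x.2 < min (R - (x.1 + 1)) C),
            f (x.1 + 1 + x.2) x.2 := by
      rw [Finset.sum_filter, Finset.sum_product]
      exact Finset.sum_congr rfl (fun i _ =>
        pv_sum_range_extend _ _ (le_trans (Nat.min_le_left _ _) (by omega)) _)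
    rw [h2]
    refine Finset.sum_nbij' (fun x => (x.1 + 1 + x.2, x.2)) (fun p => (p.1 - p.2 - 1, p.2)) ?_ ?_ ?_ ?_ ?_
    · rintro ⟨a, b⟩ hx
      simp only [Finset.mem_filter, Finset.mem_product, Finset.mem_range] at hx ⊢
      constructor
      · omega
      · simp only [not_le]; omega
    · rintro ⟨a, b⟩ hp
      simp only [Finset.mem_filter, Finset.mem_product, Finset.mem_range, not_le] at hp ⊢; omega
    · rintro ⟨a, b⟩ hx
      simp only [Finset.mem_filter, Finset.mem_product, Finset.mem_range] at hx
      simp only [Prod.mk.injEq, and_true, true_and]; omega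
    · rintro ⟨a, b⟩ hp
      simp only [Finset.mem_filter, Finset.mem_product, Finset.mem_range, not_le] at hp
      simp only [Prod.mk.injEq, and_true, true_and]; omega
    · rintro ⟨a, b⟩ hx; rfl

lemma pv_sec_reindex (R C : ℕ) (hR : 1 ≤ R) (f : ℕ → ℕ → ℤ) :
    (∑ c ∈ Finset.range (R + C - 1),
       ∑ t ∈ Finset.range (min (min c (R - 1) + 1) (C - (c - min c (R - 1)))),
         f (min c (R - 1) - t) (c - min c (R - 1) + t))
    = ∑ i ∈ Finset.range R, ∑ j ∈ Finset.range C, f i j := by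
  rw [← Finset.sum_product']
  have h1 : (∑ c ∈ Finset.range (R + C - 1),
       ∑ t ∈ Finset.range (min (min c (R - 1) + 1) (C - (c - min c (R - 1)))),
         f (min c (R - 1) - t) (c - min c (R - 1) + t))
      = ∑ x ∈ (Finset.range (R + C - 1) ×ˢ Finset.range R).filter
            (fun x => x.2 < min (min x.1 (R - 1) + 1) (C - (x.1 - min x.1 (R - 1)))),
          f (min x.1 (R - 1) - x.2) (x.1 - min x.1 (R - 1) + x.2) := by
    rw [Finset.sum_filter, Finset.sum_product]
    exact Finset.sum_congr rfl (fun c _ =>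
      pv_sum_range_extend _ _ (le_trans (Nat.min_le_left _ _) (by omega)) _)
  rw [h1]
  refine Finset.sum_nbij'
      (fun x => (min x.1 (R - 1) - x.2, x.1 - min x.1 (R - 1) + x.2))
      (fun p => (p.1 + p.2, min (p.1 + p.2) (R - 1) - p.1)) ?_ ?_ ?_ ?_ ?_
  · rintro ⟨a, b⟩ hx
    simp only [Finset.mem_filter, Finset.mem_product, Finset.mem_range] at hx ⊢; omega
  · rintro ⟨a, b⟩ hp
    simp only [Finset.mem_filter, Finset.mem_product, Finset.mem_range] at hp ⊢; omega
  · rintro ⟨a, b⟩ hx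
    simp only [Finset.mem_filter, Finset.mem_product, Finset.mem_range] at hx
    simp only [Prod.mk.injEq]; omega
  · rintro ⟨a, b⟩ hp
    simp only [Finset.mem_filter, Finset.mem_product, Finset.mem_range] at hp
    simp only [Prod.mk.injEq]; omega
  · rintro ⟨a, b⟩ hx; rfl

lemma pvA_sum (grid : List String) (sub : String) :
    search_diagonally grid sub =
      ∑ i ∈ Finset.range (grid.map String.toList).length,
        ∑ j ∈ Finset.range (((grid.map String.toList).getD 0 []).length),
          (pvIndM (grid.map String.toList) sub.toList
              (grid.map String.toList).length (((grid.map String.toList).getD 0 []).length) i j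
           + pvIndS (grid.map String.toList) sub.toList
              (((grid.map String.toList).getD 0 []).length) i j) := by
  unfold search_diagonally
  dsimp only
  have hinner : ∀ (i : ℕ) (count : ℤ),
      (List.range (((grid.map String.toList).getD 0 []).length)).foldl
        (fun count j =>
          let count :=
            if i + sub.toList.length ≤ (grid.map String.toList).length ∧
                j + sub.toList.length ≤ (((grid.map String.toList).getD 0 []).length) ∧
                ((List.range sub.toList.length).all
                  (fun k => pvCell (grid.map String.toList) (i + k) (j + k) == sub.toList.getD k ' ')) = true
            then count + 1 else count
          if sub.toList.length ≤ i + 1 ∧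
              j + sub.toList.length ≤ (((grid.map String.toList).getD 0 []).length) ∧
              ((List.range sub.toList.length).all
                (fun k => pvCell (grid.map String.toList) (i - k) (j + k) == sub.toList.getD k ' ')) = true
          then count + 1 else count) count
      = count + ∑ j ∈ Finset.range (((grid.map String.toList).getD 0 []).length),
          (pvIndM (grid.map String.toList) sub.toList
              (grid.map String.toList).length (((grid.map String.toList).getD 0 []).length) i j
           + pvIndS (grid.map String.toList) sub.toList
              (((grid.map String.toList).getD 0 []).length) i j) := by
    intro i count
    rw [show (fun (count : ℤ) j =>
          let count :=
            if i + sub.toList.length ≤ (grid.map String.toList).length ∧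
                j + sub.toList.length ≤ (((grid.map String.toList).getD 0 []).length) ∧
                ((List.range sub.toList.length).all
                  (fun k => pvCell (grid.map String.toList) (i + k) (j + k) == sub.toList.getD k ' ')) = true
            then count + 1 else count
          if sub.toList.length ≤ i + 1 ∧
              j + sub.toList.length ≤ (((grid.map String.toList).getD 0 []).length) ∧
              ((List.range sub.toList.length).all
                (fun k => pvCell (grid.map String.toList) (i - k) (j + k) == sub.toList.getD k ' ')) = true
          then count + 1 else count)
        = fun (count : ℤ) j => count +
            (pvIndM (grid.map String.toList) sub.toList
              (grid.map String.toList).length (((grid.map String.toList).getD 0 []).length) i j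
             + pvIndS (grid.map String.toList) sub.toList
              (((grid.map String.toList).getD 0 []).length) i j) from by
      funext count j
      unfold pvIndM pvIndS
      dsimp only
      split_ifs <;> ring]
    rw [pv_foldl_range_add]
  rw [show (fun (count : ℤ) i =>
        (List.range (((grid.map String.toList).getD 0 []).length)).foldl
          (fun count j =>
            let count :=
              if i + sub.toList.length ≤ (grid.map String.toList).length ∧
                  j + sub.toList.length ≤ (((grid.map String.toList).getD 0 []).length) ∧
                  ((List.range sub.toList.length).all
                    (fun k => pvCell (grid.map String.toList) (i + k) (j + k) == sub.toList.getD k ' ')) = true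
              then count + 1 else count
            if sub.toList.length ≤ i + 1 ∧
                j + sub.toList.length ≤ (((grid.map String.toList).getD 0 []).length) ∧
                ((List.range sub.toList.length).all
                  (fun k => pvCell (grid.map String.toList) (i - k) (j + k) == sub.toList.getD k ' ')) = true
            then count + 1 else count) count)
      = fun (count : ℤ) i => count +
          ∑ j ∈ Finset.range (((grid.map String.toList).getD 0 []).length),
            (pvIndM (grid.map String.toList) sub.toList
                (grid.map String.toList).length (((grid.map String.toList).getD 0 []).length) i j
             + pvIndS (grid.map String.toList) sub.toList
                (((grid.map String.toList).getD 0 []).length) i j) from by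
    funext count i
    exact hinner i count]
  rw [pv_foldl_range_add, zero_add]

lemma pvB_sum (grid : List String) (sub : String)
    (hR : 1 ≤ (grid.map String.toList).length) :
    search_diagonally_alt grid sub =
      ∑ i ∈ Finset.range (grid.map String.toList).length,
        ∑ j ∈ Finset.range (((grid.map String.toList).getD 0 []).length),
          (pvIndM (grid.map String.toList) sub.toList
              (grid.map String.toList).length (((grid.map String.toList).getD 0 []).length) i j
           + pvIndS (grid.map String.toList) sub.toList
              (((grid.map String.toList).getD 0 []).length) i j) := by
  unfold search_diagonally_alt
  dsimp only
  set g := grid.map String.toList with hg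
  set s := sub.toList with hs
  set R := g.length with hRdef
  set C := (g.getD 0 []).length with hCdef
  have hscan : ∀ (count : ℤ) (d : List Char),
      (List.range d.length).foldl
        (fun count p => if (d.drop p).take s.length = s then count + 1 else count) count
        = count + pvScanSum s d := by
    intro count d
    rw [show (fun (count : ℤ) p => if (d.drop p).take s.length = s then count + 1 else count)
        = fun (count : ℤ) p => count + (if (d.drop p).take s.length = s then (1:ℤ) else 0) from by
      funext c p; split_ifs <;> ring]
    rw [pv_foldl_range_add]; rfl
  rw [show (fun (count : ℤ) (d : List Char) =>
        (List.range d.length).foldl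
          (fun count p => if (d.drop p).take s.length = s then count + 1 else count) count)
      = fun (count : ℤ) d => count + pvScanSum s d from by
    funext count d; exact hscan count d]
  rw [pv_foldl_add', zero_add, List.map_append, List.map_append, List.sum_append, List.sum_append]
  rw [List.map_map, List.map_map, List.map_map]
  rw [pv_sum_map_range, pv_sum_map_range, pv_sum_map_range]
  have hS1 : (∑ x ∈ Finset.range C,
        ((fun d => pvScanSum s d) ∘ fun j => (List.range (min R (C - j))).map (fun t => pvCell g t (j + t))) x)
      = ∑ j ∈ Finset.range C, ∑ t ∈ Finset.range (min R (C - j)),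
          pvIndM g s R C t (j + t) := by
    refine Finset.sum_congr rfl fun j hj => ?_
    show pvScanSum s ((List.range (min R (C - j))).map (fun t => pvCell g t (j + t))) = _
    rw [pv_scan_sum_eq]
    refine Finset.sum_congr rfl fun t ht => ?_
    simp only [Finset.mem_range] at hj ht
    unfold pvIndM
    refine if_congr ?_ rfl rfl
    simp only [List.all_eq_true, List.mem_range, beq_iff_eq]
    constructor
    · rintro ⟨h1, h2⟩
      refine ⟨by omega, by omega, fun k hk => ?_⟩
      rw [Nat.add_assoc]
      exact h2 k hk
    · rintro ⟨h1, h2, h3⟩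
      refine ⟨by omega, fun k hk => ?_⟩
      rw [← Nat.add_assoc]
      exact h3 k hk
  have hS2 : (∑ x ∈ Finset.range (R - 1),
        ((fun d => pvScanSum s d) ∘ fun i => (List.range (min (R - (i + 1)) C)).map (fun t => pvCell g (i + 1 + t) t)) x)
      = ∑ i ∈ Finset.range (R - 1), ∑ t ∈ Finset.range (min (R - (i + 1)) C),
          pvIndM g s R C (i + 1 + t) t := by
    refine Finset.sum_congr rfl fun i hi => ?_
    show pvScanSum s ((List.range (min (R - (i + 1)) C)).map (fun t => pvCell g (i + 1 + t) t)) = _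
    rw [pv_scan_sum_eq]
    refine Finset.sum_congr rfl fun t ht => ?_
    simp only [Finset.mem_range] at hi ht
    unfold pvIndM
    refine if_congr ?_ rfl rfl
    simp only [List.all_eq_true, List.mem_range, beq_iff_eq]
    constructor
    · rintro ⟨h1, h2⟩
      refine ⟨by omega, by omega, fun k hk => ?_⟩
      rw [Nat.add_assoc]
      exact h2 k hk
    · rintro ⟨h1, h2, h3⟩
      refine ⟨by omega, fun k hk => ?_⟩
      rw [← Nat.add_assoc]
      exact h3 k hk
  have hS3 : (∑ x ∈ Finset.range (R + C - 1),
        ((fun d => pvScanSum s d) ∘ fun c =>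
          (List.range (min (min c (R - 1) + 1) (C - (c - min c (R - 1))))).map
            (fun t => pvCell g (min c (R - 1) - t) (c - min c (R - 1) + t))) x)
      = ∑ c ∈ Finset.range (R + C - 1),
          ∑ t ∈ Finset.range (min (min c (R - 1) + 1) (C - (c - min c (R - 1)))),
            pvIndS g s C (min c (R - 1) - t) (c - min c (R - 1) + t) := by
    refine Finset.sum_congr rfl fun c hc => ?_
    show pvScanSum s ((List.range (min (min c (R - 1) + 1) (C - (c - min c (R - 1))))).map
          (fun t => pvCell g (min c (R - 1) - t) (c - min c (R - 1) + t))) = _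
    rw [pv_scan_sum_eq]
    refine Finset.sum_congr rfl fun t ht => ?_
    simp only [Finset.mem_range] at hc ht
    unfold pvIndS
    refine if_congr ?_ rfl rfl
    simp only [List.all_eq_true, List.mem_range, beq_iff_eq]
    constructor
    · rintro ⟨h1, h2⟩
      refine ⟨by omega, by omega, fun k hk => ?_⟩
      rw [Nat.sub_sub, Nat.add_assoc]
      exact h2 k hk
    · rintro ⟨h1, h2, h3⟩
      refine ⟨by omega, fun k hk => ?_⟩
      rw [← Nat.add_assoc, ← Nat.sub_sub]
      exact h3 k hk
  rw [hS1, hS2, hS3]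
  rw [pv_main_reindex R C (fun i j => pvIndM g s R C i j)]
  rw [pv_sec_reindex R C hR (fun i j => pvIndS g s C i j)]
  rw [← Finset.sum_add_distrib]
  exact Finset.sum_congr rfl fun i _ => (Finset.sum_add_distrib).symm

-- ===== VERDICT (by name: the statement is the Claim_ definition above) =====
theorem search_diagonally_spec : Claim_equal_search_diagonally := by
  intro grid sub _ hpre
  unfold Spec_search_diagonally
  have hR : 1 ≤ (grid.map String.toList).length := by
    rcases hpre with ⟨hne, -⟩
    cases grid with
    | nil => exact absurd rfl hne
    | cons a l => simp
  rw [pvA_sum, pvB_sum grid sub hR]
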